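-- pv_equiv track=rewrite | github.com/SvStranik/clear_code | task3.py | LineAnalysis
-- ===== SOURCE A (Python) =====
-- def LineAnalysis(line):
--     is_Found = False
--     symbol = '*'
--     if line == symbol * len(line):
--         is_Found = True
--         return is_Found
--     if line[0] != symbol or line[len(line)-1] != symbol:
--         return is_Found
--     convertedLine = line[1:len(line)-1]
--     convertedLine1 = (convertedLine.replace('*',',')).split(',')
--     for i in range(len(convertedLine1)-1):
--         if convertedLine1[i] != convertedLine1[i+1]: return is_Found
--     is_Found = True
--     return is_Found
-- ===== SOURCE B (Python) =====
-- def LineAnalysis(line):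
--     # B: reconstruct-and-compare. Both '*' and ',' act as segment separators in A
--     # (it splits via replace('*',',') + split(',')), so normalise ',' to '*';
--     # the line is valid iff it IS the canonical repetition '*' + (seg + '*') * m.
--     if not line:
--         return True
--     if line[0] != '*' or line[-1] != '*':
--         return False
--     norm = line.replace(',', '*')
--     seg = norm[1:].partition('*')[0]
--     m = (len(line) - 1) // (len(seg) + 1)
--     return norm == '*' + (seg + '*') * m
-- ===== Notes on version B (the rewrite author's own statement) =====
-- stated objective: alternative
-- what changed: Replaces A's split-into-all-segments-then-pairwise-adjacent-comparison loop by extracting only the first segment, reconstructing the canonical repetition '*' + (seg + '*') * m and deciding with a single string equality (',' is normalised to '*' first, since A's replace('*',',') + split(',') makes both characters separators).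
import Mathlib
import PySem

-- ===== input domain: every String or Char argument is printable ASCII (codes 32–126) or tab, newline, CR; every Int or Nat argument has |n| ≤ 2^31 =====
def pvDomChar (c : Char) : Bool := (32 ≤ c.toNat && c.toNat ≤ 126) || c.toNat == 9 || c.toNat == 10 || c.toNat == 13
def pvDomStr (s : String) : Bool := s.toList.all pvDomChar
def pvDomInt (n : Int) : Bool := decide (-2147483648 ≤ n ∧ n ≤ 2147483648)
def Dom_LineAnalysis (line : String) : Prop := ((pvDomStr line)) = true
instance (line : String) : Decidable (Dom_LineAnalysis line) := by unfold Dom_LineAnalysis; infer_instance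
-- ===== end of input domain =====

-- B replaces A's split-into-all-segments + pairwise-adjacent-comparison loop by a
-- reconstruct-and-compare: take the first segment, rebuild '*'+(seg+'*')*m, one equality
-- (',' normalised to '*': A's replace('*',',')+split(',') makes both chars separators).

-- ===== PORT A =====
-- the early-return 'for i in range(len(convertedLine1)-1)' loop of A
def pvALoop (parts : List (List Char)) : List Int → Bool
  | [] => true
  | i :: rest =>
      if PySem.List.pyGetD parts i [] ≠ PySem.List.pyGetD parts (i + 1) [] then false
      else pvALoop parts rest

def LineAnalysis (line : String) : Bool :=
  let cs := line.toList
  -- if line == '*' * len(line): return True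
  if cs = List.replicate cs.length '*' then true
  -- if line[0] != '*' or line[len(line)-1] != '*': return False
  -- (indices are in range here: the empty string was caught by the branch above)
  else if PySem.List.pyGetD cs 0 ' ' ≠ '*' ∨ PySem.List.pyGetD cs ((cs.length : Int) - 1) ' ' ≠ '*' then false
  else
    let convertedLine := PySem.List.slice cs (some 1) (some ((cs.length : Int) - 1))
    let parts := PySem.Chars.splitOn (PySem.Chars.replace convertedLine ['*'] [',']) [',']
    pvALoop parts (PySem.List.pyRange 0 (PySem.List.len parts - 1))

-- ===== PORT B =====
def LineAnalysis_alt (line : String) : Bool :=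
  let cs := line.toList
  if cs = [] then true
  else if PySem.List.pyGetD cs 0 ' ' ≠ '*' ∨ PySem.List.pyGetD cs (-1) ' ' ≠ '*' then false
  else
    let norm := PySem.Chars.replace cs [','] ['*']
    -- norm[1:].partition('*')[0] = the prefix of norm[1:] before the first '*'
    let seg := (PySem.List.slice norm (some 1) none).takeWhile (fun c => c != '*')
    let m := (cs.length - 1) / (seg.length + 1)
    -- norm == '*' + (seg + '*') * m
    decide (norm = '*' :: (List.replicate m (seg ++ ['*'])).flatten)

-- ===== PRECONDITION & SPEC =====
def Spec_LineAnalysis (line : String) (out : Bool) : Prop := out = LineAnalysis_alt line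
instance (line : String) (out : Bool) : Decidable (Spec_LineAnalysis line out) := by unfold Spec_LineAnalysis; infer_instance

-- ===== CLAIM (what is proved, stated in full; the proofs are below) =====
def Claim_equal_LineAnalysis : Prop := ∀ (line : String), Dom_LineAnalysis line → Spec_LineAnalysis line (LineAnalysis line)

-- ===== LEMMAS AND PROOFS =====

-- the separator predicate: '*' or ',' (A separates via replace('*',',') + split(','))
def pvDelim (c : Char) : Bool := c = '*' || c = ','

-- reference split of a char list on a predicate (used only in proofs)
def pvSplit (p : Char → Bool) : List Char → List (List Char)
  | [] => [[]]
  | c :: rest => if p c then [] :: pvSplit p rest else (pvSplit p rest).modifyHead (c :: ·)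

-- "all segments equal to the first"
def pvAllEq : List (List Char) → Bool
  | [] => true
  | s :: ss => ss.all (fun x => decide (x = s))

theorem pvSplit_ne_nil (p : Char → Bool) (l : List Char) : pvSplit p l ≠ [] := by
  induction l with
  | nil => simp [pvSplit]
  | cons c rest ih =>
      simp only [pvSplit]
      split
      · simp
      · cases h : pvSplit p rest with
        | nil => exact absurd h ih
        | cons a as => simp

theorem pvSplit_no_delim (p : Char → Bool) (l : List Char) (h : ∀ c ∈ l, p c = false) :
    pvSplit p l = [l] := by
  induction l with
  | nil => rfl
  | cons c rest ih =>
      simp only [pvSplit, h c (by simp)]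
      rw [ih (fun d hd => h d (by simp [hd]))]
      rfl

theorem pvSplit_append (p : Char → Bool) (xs : List Char) (d : Char) (ys : List Char)
    (h : ∀ c ∈ xs, p c = false) (hd : p d = true) :
    pvSplit p (xs ++ d :: ys) = xs :: pvSplit p ys := by
  induction xs with
  | nil => simp [pvSplit, hd]
  | cons c rest ih =>
      simp only [List.cons_append, pvSplit, h c (by simp)]
      rw [ih (fun e he => h e (by simp [he]))]
      rfl

-- replace(s, x, y) for single chars is the character map
theorem pvReplaceGo (x y : Char) (fuel : Nat) (l acc : List Char) (hf : l.length ≤ fuel) :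
    PySem.Chars.replace.go [x] [y] fuel l acc =
      acc.reverse ++ l.map (fun c => if c = x then y else c) := by
  induction fuel generalizing l acc with
  | zero =>
      have : l = [] := List.length_eq_zero_iff.mp (Nat.le_zero.mp hf)
      subst this; rfl
  | succ fuel ih =>
      cases l with
      | nil => rw [PySem.Chars.replace.go]; simp; omega
      | cons c t =>
          rw [PySem.Chars.replace.go]
          by_cases hc : c = x
          · subst hc
            have hpre : ([c].isPrefixOf (c :: t)) = true := by
              simp [List.isPrefixOf]
            rw [hpre]
            simp only [if_true]
            have hdrop : List.drop [c].length (c :: t) = t := by simp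
            rw [hdrop, ih t _ (by simpa using Nat.le_of_succ_le_succ hf)]
            simp
          · have hpre : ([x].isPrefixOf (c :: t)) = false := by
              simp [List.isPrefixOf]; exact fun h => absurd h.symm hc
            rw [hpre]
            simp only [Bool.false_eq_true, if_false]
            rw [ih t _ (by simpa using Nat.le_of_succ_le_succ hf)]
            simp [hc]

theorem pvReplace_single (x y : Char) (s : List Char) :
    PySem.Chars.replace s [x] [y] = s.map (fun c => if c = x then y else c) := by
  show PySem.Chars.replace.go [x] [y] s.length s [] = _
  simpa using pvReplaceGo x y s.length s [] le_rfl

-- split(s, ',') is pvSplit on (· == ',')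
theorem pvSplitOnGo (fuel : Nat) (l cur : List Char) (acc : List (List Char)) (hf : l.length ≤ fuel) :
    PySem.Chars.splitOn.go [','] fuel l cur acc =
      acc.reverse ++ (pvSplit (fun c => c == ',') l).modifyHead (cur.reverse ++ ·) := by
  induction fuel generalizing l cur acc with
  | zero =>
      have : l = [] := List.length_eq_zero_iff.mp (Nat.le_zero.mp hf)
      subst this
      simp [PySem.Chars.splitOn.go, pvSplit]
  | succ fuel ih =>
      cases l with
      | nil => simp [PySem.Chars.splitOn.go, pvSplit]
      | cons c t =>
          rw [PySem.Chars.splitOn.go]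
          by_cases hc : c = ','
          · subst hc
            have hpre : ([','].isPrefixOf (',' :: t)) = true := by
              simp [List.isPrefixOf]
            rw [hpre]
            simp only [if_true]
            have hdrop : List.drop [','].length (',' :: t) = t := by simp
            rw [hdrop, ih t [] _ (by simpa using Nat.le_of_succ_le_succ hf)]
            simp only [pvSplit, beq_self_eq_true, if_true]
            cases pvSplit (fun c => c == ',') t <;> simp [List.modifyHead]
          · have hpre : ([','].isPrefixOf (c :: t)) = false := by
              simp [List.isPrefixOf]; exact fun h => absurd h.symm hc
            simp only [hpre, Bool.false_eq_true, if_false]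
            rw [ih t (c :: cur) acc (by simpa using Nat.le_of_succ_le_succ hf)]
            have hne : pvSplit (fun c => c == ',') t ≠ [] := pvSplit_ne_nil _ _
            simp only [pvSplit, beq_iff_eq, hc, if_false]
            cases h : pvSplit (fun c => c == ',') t with
            | nil => exact absurd h hne
            | cons a as => simp [List.modifyHead]

theorem pvSplitOn_comma (s : List Char) :
    PySem.Chars.splitOn s [','] = pvSplit (fun c => c == ',') s := by
  show PySem.Chars.splitOn.go [','] (s.length + 1) s [] [] = _
  rw [pvSplitOnGo _ _ _ _ (Nat.le_succ _)]
  have hne : pvSplit (fun c => c == ',') s ≠ [] := pvSplit_ne_nil _ _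
  cases h : pvSplit (fun c => c == ',') s with
  | nil => exact absurd h hne
  | cons a as => simp [List.modifyHead]

-- splitting A's '*'→',' mapped string on ',' = splitting the original on {'*',','}
theorem pvSplit_map (s : List Char) :
    pvSplit (fun c => c == ',') (s.map (fun c => if c = '*' then ',' else c)) =
      pvSplit pvDelim s := by
  induction s with
  | nil => rfl
  | cons c t ih =>
      by_cases hc : pvDelim c = true
      · have hc' : (if c = '*' then ',' else c) = ',' := by
          simp [pvDelim] at hc
          rcases hc with h | h <;> simp [h]
        simp [pvSplit, hc', hc, ih]
      · have h1 : c ≠ '*' := by intro h; simp [pvDelim, h] at hc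
        have h2 : c ≠ ',' := by intro h; simp [pvDelim, h] at hc
        simp [pvSplit, h1, h2, hc, ih]

-- splitting B's ','→'*' mapped string on '*' = splitting the original on {'*',','}
theorem pvSplit_map_star (s : List Char) :
    pvSplit (fun c => c == '*') (s.map (fun c => if c = ',' then '*' else c)) =
      pvSplit pvDelim s := by
  induction s with
  | nil => rfl
  | cons c t ih =>
      by_cases hc : pvDelim c = true
      · have hc' : (if c = ',' then '*' else c) = '*' := by
          simp [pvDelim] at hc
          rcases hc with h | h <;> simp [h]
        simp [pvSplit, hc', hc, ih]
      · have h1 : c ≠ '*' := by intro h; simp [pvDelim, h] at hc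
        have h2 : c ≠ ',' := by intro h; simp [pvDelim, h] at hc
        simp [pvSplit, h1, h2, hc, ih]

-- A's early-return loop is List.all
theorem pvALoop_eq_all (parts : List (List Char)) (r : List Int) :
    pvALoop parts r =
      r.all (fun i => PySem.List.pyGetD parts i [] == PySem.List.pyGetD parts (i + 1) []) := by
  induction r with
  | nil => rfl
  | cons i rest ih =>
      simp only [pvALoop, List.all_cons, ih]
      by_cases h : PySem.List.pyGetD parts i [] = PySem.List.pyGetD parts (i + 1) []
      · simp [h]
      · simp only [ne_eq, h, not_false_iff, if_true]
        simp [h]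

-- adjacent-equality over the index range = all segments equal to the first
theorem pvAdj_eq_allEq (l : List (List Char)) (hl : l ≠ []) :
    (PySem.List.pyRange 0 (PySem.List.len l - 1)).all
        (fun i => PySem.List.pyGetD l i [] == PySem.List.pyGetD l (i + 1) []) = pvAllEq l := by
  obtain ⟨s, ss, rfl⟩ := List.exists_cons_of_ne_nil hl
  rw [Bool.eq_iff_iff]
  simp only [List.all_eq_true, PySem.List.mem_pyRange_one, PySem.List.len_eq, pvAllEq,
    beq_iff_eq, decide_eq_true_eq, List.length_cons, and_imp]
  constructor
  · intro h x hx
    have hstep : ∀ j : Nat, j < ss.length → (s :: ss).getD j [] = (s :: ss).getD (j + 1) [] := by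
      intro j hj
      have hb := h (j : Int) (Int.natCast_nonneg j) (by push_cast; omega)
      rw [PySem.List.pyGetD_natCast] at hb
      rw [show ((j : Int) + 1) = ((j + 1 : Nat) : Int) from by push_cast; ring,
        PySem.List.pyGetD_natCast] at hb
      exact hb
    have key : ∀ k : Nat, k ≤ ss.length → (s :: ss).getD k [] = s := by
      intro k
      induction k with
      | zero => intro _; rfl
      | succ j ihk =>
          intro hk
          rw [← hstep j (by omega)]
          exact ihk (by omega)
    obtain ⟨j, hj, rfl⟩ := List.mem_iff_getElem.mp hx
    have := key (j + 1) (by omega)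
    rw [List.getD_cons_succ, List.getD_eq_getElem ss [] hj] at this
    exact this
  · intro h i hi0 hiub
    have hs : ∀ k : Nat, k ≤ ss.length → (s :: ss).getD k [] = s := by
      intro k hk
      cases k with
      | zero => rfl
      | succ j =>
          rw [List.getD_cons_succ, List.getD_eq_getElem ss [] (by omega)]
          exact h _ (List.getElem_mem _)
    have hik : i = ((i.toNat : Nat) : Int) := (Int.toNat_of_nonneg hi0).symm
    have hklt : i.toNat < ss.length := by omega
    rw [hik, PySem.List.pyGetD_natCast,
      show (((i.toNat : Nat) : Int) + 1) = ((i.toNat + 1 : Nat) : Int) from by push_cast; ring,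
      PySem.List.pyGetD_natCast, hs i.toNat (by omega), hs (i.toNat + 1) (by omega)]

-- the first split segment is the takeWhile prefix
theorem pvSplit_head_star (u s : List Char) (ss : List (List Char))
    (h : pvSplit (fun c => c == '*') u = s :: ss) :
    s = u.takeWhile (fun c => c != '*') := by
  induction u generalizing s ss with
  | nil =>
      simp only [pvSplit] at h
      injection h with h1 h2
      simp [← h1]
  | cons c t ih =>
      by_cases hc : c = '*'
      · subst hc
        simp only [pvSplit, beq_self_eq_true, if_true] at h
        injection h with h1 h2
        rw [← h1]
        simp [List.takeWhile]
      · obtain ⟨a, as, ha⟩ := List.exists_cons_of_ne_nil (pvSplit_ne_nil (fun c => c == '*') t)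
        simp only [pvSplit, beq_iff_eq, hc, if_false, ha, List.modifyHead] at h
        injection h with h1 h2
        rw [← h1, List.takeWhile_cons]
        simp only [bne_iff_ne, ne_eq, hc, not_false_iff, if_true]
        rw [ih a as ha]

-- joining the split segments with the delimiter reproduces u ++ ['*']
theorem pvJoin (u : List Char) :
    u ++ ['*'] = ((pvSplit (fun c => c == '*') u).map (· ++ ['*'])).flatten := by
  induction u with
  | nil => simp [pvSplit]
  | cons c t ih =>
      by_cases hc : c = '*'
      · subst hc
        simp only [pvSplit, beq_self_eq_true, if_true, List.map_cons, List.flatten_cons]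
        rw [← ih]
        simp
      · obtain ⟨a, as, ha⟩ := List.exists_cons_of_ne_nil (pvSplit_ne_nil (fun c => c == '*') t)
        simp only [pvSplit, beq_iff_eq, hc, if_false, ha, List.modifyHead, List.map_cons,
          List.flatten_cons]
        have ih' : t ++ ['*'] = (a ++ ['*']) ++ ((as.map (· ++ ['*'])).flatten) := by
          rw [ih, ha]; simp
        calc (c :: t) ++ ['*'] = c :: (t ++ ['*']) := rfl
          _ = c :: ((a ++ ['*']) ++ ((as.map (· ++ ['*'])).flatten)) := by rw [ih']
          _ = ((c :: a) ++ ['*']) ++ ((as.map (· ++ ['*'])).flatten) := by simp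

-- a star-free w: if u ++ ['*'] is m copies of (w ++ ['*']), the split is m copies of w
theorem pvSplitRep (w : List Char) (hw : ∀ c ∈ w, ((c == '*') : Bool) = false) :
    ∀ (m : Nat) (u : List Char),
      u ++ ['*'] = (List.replicate m (w ++ ['*'])).flatten →
      pvSplit (fun c => c == '*') u = List.replicate m w := by
  intro m
  induction m with
  | zero => intro u h; simp at h
  | succ k ih =>
      intro u h
      cases k with
      | zero =>
          simp only [List.replicate_succ, List.replicate_zero, List.flatten_cons,
            List.flatten_nil, List.append_nil] at h
          have hu : u = w := (List.append_inj' h rfl).1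
          subst hu
          rw [pvSplit_no_delim _ _ hw]
          simp
      | succ j =>
          -- flatten (replicate (j+2) x) = x ++ (u'' ++ ['*']) with u''++['*'] = flatten (replicate (j+1) x)
          have hR : (List.replicate (j + 1) (w ++ ['*'])).flatten =
              ((List.replicate j (w ++ ['*'])).flatten ++ w) ++ ['*'] := by
            rw [List.replicate_succ', List.flatten_append]
            simp [List.append_assoc]
          rw [List.replicate_succ, List.flatten_cons, hR] at h
          have hu : u = w ++ '*' :: ((List.replicate j (w ++ ['*'])).flatten ++ w) := by
            have h' : u ++ ['*'] =
                (w ++ '*' :: ((List.replicate j (w ++ ['*'])).flatten ++ w)) ++ ['*'] := by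
              simpa [List.append_assoc] using h
            exact (List.append_inj' h' rfl).1
          subst hu
          rw [pvSplit_append _ _ _ _ hw (by simp)]
          rw [ih _ (by rw [hR])]
          simp [List.replicate_succ]

-- all-delimiter interiors split into empty segments only
theorem pvSplit_all_delim (mid : List Char) (h : ∀ c ∈ mid, pvDelim c = true) :
    pvSplit pvDelim mid = List.replicate (mid.length + 1) [] := by
  induction mid with
  | nil => rfl
  | cons c t ih =>
      simp only [pvSplit, h c (by simp), if_true, List.length_cons]
      rw [ih (fun d hd => h d (by simp [hd]))]
      simp [List.replicate_succ]

theorem pvAllEq_replicate (m : Nat) (w : List Char) : pvAllEq (List.replicate m w) = true := by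
  cases m with
  | zero => rfl
  | succ k =>
      simp only [List.replicate_succ, pvAllEq, List.all_eq_true, decide_eq_true_eq]
      exact fun x hx => List.eq_of_mem_replicate hx

theorem pvFlatRepLen (k : Nat) (w : List Char) :
    ((List.replicate k w).flatten).length = k * w.length := by
  induction k with
  | zero => simp
  | succ j ih => rw [List.replicate_succ, List.flatten_cons, List.length_append, ih]; ring

-- the core: B's reconstruct-and-compare equals "all segments of mid equal"
theorem pvBCore (mid : List Char) :
    (decide (('*' :: ((mid.map (fun c => if c = ',' then '*' else c)) ++ ['*'])) =
      '*' :: (List.replicate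
        ((mid.length + 1) /
          (((mid.map (fun c => if c = ',' then '*' else c)).takeWhile (fun c => c != '*')).length + 1))
        (((mid.map (fun c => if c = ',' then '*' else c)).takeWhile (fun c => c != '*')) ++ ['*'])).flatten))
    = pvAllEq (pvSplit pvDelim mid) := by
  set u := mid.map (fun c => if c = ',' then '*' else c) with hu
  set seg := u.takeWhile (fun c => c != '*') with hseg
  have hlen : u.length = mid.length := by rw [hu]; simp
  have hsegfree : ∀ c ∈ seg, ((c == '*') : Bool) = false := by
    intro c hc
    have := List.mem_takeWhile_imp hc
    simpa using this
  obtain ⟨s0, ss, hP⟩ := List.exists_cons_of_ne_nil (pvSplit_ne_nil (fun c => c == '*') u)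
  have hs0 : s0 = seg := by rw [hseg]; exact pvSplit_head_star u s0 ss hP
  rw [← pvSplit_map_star mid, ← hu]
  rw [Bool.eq_iff_iff]
  simp only [decide_eq_true_eq, List.cons.injEq, true_and]
  constructor
  · -- reconstruction holds → all segments equal
    intro h
    rw [← hlen] at h
    have hrep := pvSplitRep seg hsegfree _ u h
    rw [hrep]
    exact pvAllEq_replicate _ _
  · -- all segments equal → reconstruction holds
    intro h
    rw [hP] at h
    simp only [pvAllEq, List.all_eq_true, decide_eq_true_eq] at h
    have hrep : pvSplit (fun c => c == '*') u = List.replicate (ss.length + 1) s0 := by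
      rw [hP]
      refine (List.eq_replicate_length.mpr ?_)
      intro b hb
      rcases List.mem_cons.mp hb with hb | hb
      · exact hb
      · exact h b hb
    have hjoin := pvJoin u
    rw [hrep, List.map_replicate] at hjoin
    have hlenu : u.length + 1 = (ss.length + 1) * (s0.length + 1) := by
      have := congrArg List.length hjoin
      simpa [pvFlatRepLen] using this
    have hm : (mid.length + 1) / (seg.length + 1) = ss.length + 1 := by
      rw [← hlen, ← hs0, hlenu]
      exact Nat.mul_div_cancel _ (by omega)
    rw [hm, ← hs0]
    exact hjoin

-- single-character single-delimiter (needed for the tiny boundary facts)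
theorem pvLast_concat (a z : Char) (mid : List Char) :
    PySem.List.pyGetD (a :: (mid ++ [z])) (((a :: (mid ++ [z])).length : Int) - 1) ' ' = z := by
  rw [show (((a :: (mid ++ [z])).length : Int) - 1) = ((mid.length + 1 : Nat) : Int) from by simp]
  rw [PySem.List.pyGetD_natCast, List.getD_cons_succ, List.getD_eq_getElem _ _ (by simp),
    List.getElem_concat_length rfl]

-- the interior slice line[1:len-1]
theorem pvSliceMid (a z : Char) (mid : List Char) :
    PySem.List.slice (a :: (mid ++ [z])) (some 1)
        (some (((a :: (mid ++ [z])).length : Int) - 1)) = mid := by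
  have hlen : (a :: (mid ++ [z])).length = mid.length + 2 := by simp
  simp only [PySem.List.slice, PySem.List.clampIdx, hlen]
  norm_num
  rw [if_neg (show ¬((mid.length : Int) + 2 < 1) from by omega)]
  rw [show ((mid.length : Int) + 2).toNat - 1 - 1 = mid.length from by omega]
  exact List.take_left' rfl

-- takeWhile over the appended final delimiter
theorem pvTakeWhile_concat (u : List Char) :
    (u ++ ['*']).takeWhile (fun c => c != '*') = u.takeWhile (fun c => c != '*') := by
  induction u with
  | nil => simp
  | cons c t ih =>
      by_cases hc : c = '*'
      · simp [hc]
      · simp [hc, ih]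

-- B's else-branch on a '*'-bounded line equals "all segments of the interior equal"
theorem pvBVal (mid : List Char) :
    (let cs := '*' :: (mid ++ ['*']);
     let norm := PySem.Chars.replace cs [','] ['*'];
     let seg := (PySem.List.slice norm (some 1) none).takeWhile (fun c => c != '*');
     let m := (cs.length - 1) / (seg.length + 1);
     decide (norm = '*' :: (List.replicate m (seg ++ ['*'])).flatten))
    = pvAllEq (pvSplit pvDelim mid) := by
  dsimp only
  rw [pvReplace_single]
  have hmap : ('*' :: (mid ++ ['*'])).map (fun c => if c = ',' then '*' else c) =
      '*' :: ((mid.map (fun c => if c = ',' then '*' else c)) ++ ['*']) := by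
    simp
  rw [hmap, PySem.List.slice_from_one, List.tail_cons, pvTakeWhile_concat]
  have hlen : ('*' :: (mid ++ ['*'])).length - 1 = mid.length + 1 := by simp
  rw [hlen]
  exact pvBCore mid

-- main agreement
theorem pvMain (line : String) : LineAnalysis line = LineAnalysis_alt line := by
  unfold LineAnalysis LineAnalysis_alt
  dsimp only
  rcases h0 : line.toList with _ | ⟨a, t⟩
  · simp
  · rcases List.eq_nil_or_concat t with ht | ⟨mid, z, hmz⟩
    · -- single-character line
      subst ht
      by_cases ha : a = '*'
      · subst ha
        decide
      · have h1 : PySem.List.pyGetD [a] 0 ' ' = a := PySem.List.pyGetD_zero_cons a [] ' '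
        rw [if_neg (show ¬(([a] : List Char) = List.replicate ([a] : List Char).length '*') from
          by simpa using ha)]
        rw [if_pos (by rw [h1]; exact Or.inl ha)]
        rw [if_neg (show ¬(([a] : List Char) = []) from by simp)]
        rw [if_pos (by rw [PySem.List.pyGetD_zero_cons]; exact Or.inl ha)]
    · rw [List.concat_eq_append] at hmz
      subst hmz
      have hfst : PySem.List.pyGetD (a :: (mid ++ [z])) 0 ' ' = a :=
        PySem.List.pyGetD_zero_cons _ _ _
      have hlst := pvLast_concat a z mid
      have hlstB : PySem.List.pyGetD (a :: (mid ++ [z])) (-1) ' ' = z := by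
        rw [show a :: (mid ++ [z]) = (a :: mid) ++ [z] from by simp]
        exact PySem.List.pyGetD_neg_one_append_singleton _ _ _
      have hnilB : ¬(a :: (mid ++ [z]) = ([] : List Char)) := by simp
      by_cases hok : a = '*' ∧ z = '*'
      · obtain ⟨ha, hz⟩ := hok
        subst ha; subst hz
        rw [if_neg hnilB]
        rw [if_neg (show ¬(PySem.List.pyGetD ('*' :: (mid ++ ['*'])) 0 ' ' ≠ '*' ∨
            PySem.List.pyGetD ('*' :: (mid ++ ['*'])) (-1) ' ' ≠ '*') from by
          rw [hfst, hlstB]; simp)]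
        have hB := pvBVal mid
        dsimp only at hB
        rw [hB]
        rw [if_neg (show ¬(PySem.List.pyGetD ('*' :: (mid ++ ['*'])) 0 ' ' ≠ '*' ∨
            PySem.List.pyGetD ('*' :: (mid ++ ['*']))
              ((('*' :: (mid ++ ['*'])).length : Int) - 1) ' ' ≠ '*') from by
          rw [hfst, hlst]; simp)]
        rw [pvSliceMid, pvReplace_single, pvSplitOn_comma, pvSplit_map]
        rw [pvALoop_eq_all, pvAdj_eq_allEq _ (pvSplit_ne_nil _ _)]
        by_cases hall : ∀ c ∈ ('*' :: (mid ++ ['*']) : List Char), c = '*'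
        · rw [if_pos (List.eq_replicate_length.mpr hall)]
          have hmid : ∀ c ∈ mid, pvDelim c = true := by
            intro c hc
            have : c = '*' := hall c (by simp [hc])
            simp [pvDelim, this]
          rw [pvSplit_all_delim mid hmid, pvAllEq_replicate]
        · rw [if_neg (fun h => hall (List.eq_replicate_length.mp h))]
      · rw [if_neg (show ¬(a :: (mid ++ [z]) = List.replicate (a :: (mid ++ [z])).length '*') from
          fun h => hok ⟨(List.eq_replicate_length.mp h) a (by simp),
            (List.eq_replicate_length.mp h) z (by simp)⟩)]
        rw [if_pos (show (PySem.List.pyGetD (a :: (mid ++ [z])) 0 ' ' ≠ '*' ∨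
            PySem.List.pyGetD (a :: (mid ++ [z]))
              (((a :: (mid ++ [z])).length : Int) - 1) ' ' ≠ '*') from by
          rw [hfst, hlst]; tauto)]
        rw [if_neg hnilB]
        rw [if_pos (show (PySem.List.pyGetD (a :: (mid ++ [z])) 0 ' ' ≠ '*' ∨
            PySem.List.pyGetD (a :: (mid ++ [z])) (-1) ' ' ≠ '*') from by
          rw [hfst, hlstB]; tauto)]

-- ===== VERDICT (by name: the statement is the Claim_ definition above) =====
theorem LineAnalysis_spec : Claim_equal_LineAnalysis := by
  intro line _
  unfold Spec_LineAnalysis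
  exact pvMain line
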